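-- pv_equiv track=rewrite | github.com/Deviyx/ReactSIP | scripts/faster_whisper_worker.py | is_hallucination_loop
-- ===== SOURCE A (Python) =====
-- def normalize_ws(text: str) -> str:
--     return " ".join((text or "").strip().split())
--
-- def is_hallucination_loop(text: str) -> bool:
--     words = normalize_ws(text).lower().split(" ")
--     words = [w for w in words if w]
--     if len(words) < 10:
--         return False
--
--     # Very common loop pattern: same 1-2 words repeated too many times.
--     unique = set(words)
--     if len(unique) <= 2 and len(words) >= 10:
--         return True
--
--     # Repeated trigram pattern over the whole sentence.
--     trigrams = [" ".join(words[i:i + 3]) for i in range(0, max(0, len(words) - 2))]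
--     if not trigrams:
--         return False
--     top = max(trigrams.count(t) for t in set(trigrams))
--     return top >= max(4, len(trigrams) // 2)
-- ===== SOURCE B (Python) =====
-- def is_hallucination_loop(text: str) -> bool:
--     words = [w for w in " ".join((text or "").strip().split()).lower().split(" ") if w]
--     if len(words) < 10:
--         return False
--     if len(set(words)) <= 2:
--         return True
--     # Trigrams via zip, then sort and take the longest run of equal neighbours.
--     trigrams = [" ".join(t) for t in zip(words, words[1:], words[2:])]
--     if not trigrams:
--         return False
--     best = 0
--     run = 0
--     prev = None
--     for t in sorted(trigrams):
--         if t == prev: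
--             run += 1
--         else:
--             prev = t
--             run = 1
--         if run > best:
--             best = run
--     return best >= max(4, len(trigrams) // 2)
-- ===== Notes on version B (the rewrite author's own statement) =====
-- stated objective: alternative
-- what changed: Replaces the per-distinct-trigram count scan (max of trigrams.count(t) over set(trigrams)) by building trigrams with zip and sorting them once, then a single linear run-length scan for the longest block of equal neighbours.
import Mathlib
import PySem

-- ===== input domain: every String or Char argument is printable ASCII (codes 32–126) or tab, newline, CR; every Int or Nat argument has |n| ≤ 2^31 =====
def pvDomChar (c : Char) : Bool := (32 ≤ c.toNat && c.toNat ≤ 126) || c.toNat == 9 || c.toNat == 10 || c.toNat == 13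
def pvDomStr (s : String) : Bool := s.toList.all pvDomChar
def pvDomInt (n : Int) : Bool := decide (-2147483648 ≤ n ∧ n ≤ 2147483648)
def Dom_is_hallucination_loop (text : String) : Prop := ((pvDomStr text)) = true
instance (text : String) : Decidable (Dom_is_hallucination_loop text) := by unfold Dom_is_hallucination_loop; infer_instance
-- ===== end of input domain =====

-- B builds the trigram list via zip instead of range/slices, then sorts it once and takes the
-- longest run of equal neighbours instead of counting each distinct trigram over the whole list (alternative algorithm).


-- ===== PORT A =====
-- " ".join((text or "").strip().split())
def normalize_ws_port (text : String) : String :=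
  PySem.Str.join " " (PySem.Str.split₀ (PySem.Str.strip text))

def is_hallucination_loop (text : String) : Bool :=
  let words := (((PySem.Str.split? (PySem.Str.lower (normalize_ws_port text)) " ").getD [])).filter (fun w => w != "")
  if words.length < 10 then false
  else
    let unique := PySem.Set.ofList words
    if PySem.Set.len unique ≤ 2 ∧ 10 ≤ words.length then true
    else
      let trigrams := (PySem.List.pyRange 0 (max 0 ((words.length : Int) - 2)) 1).map
        (fun i => PySem.Str.join " " (PySem.List.slice words (some i) (some (i + 3))))
      if trigrams = [] then false
      else
        match PySem.List.max? ((PySem.Set.ofList trigrams).map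
            (fun t => (PySem.List.count trigrams t : Int))) (fun c => c) with
        | some top => decide (top ≥ max 4 (PySem.Int.floordiv (trigrams.length : Int) 2))
        | none => false

-- ===== PORT B =====
-- the body of B's run-length for-loop over the sorted trigrams
def pvRunStep (s : Int × Int × Option String) (t : String) : Int × Int × Option String :=
  let (best, run, prev) := s
  let (run, prev) := if prev == some t then (run + 1, prev) else (1, some t)
  let best := if run > best then run else best
  (best, run, prev)

def is_hallucination_loop_alt (text : String) : Bool :=
  let words := (((PySem.Str.split? (PySem.Str.lower (normalize_ws_port text)) " ").getD [])).filter (fun w => w != "")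
  if words.length < 10 then false
  else if PySem.Set.len (PySem.Set.ofList words) ≤ 2 then true
  else
    let trigrams := (List.zip words (List.zip (PySem.List.slice words (some 1) none)
        (PySem.List.slice words (some 2) none))).map
      (fun p => PySem.Str.join " " [p.1, p.2.1, p.2.2])
    if trigrams = [] then false
    else
      let st := (PySem.List.sorted trigrams (fun t => t) false).foldl pvRunStep (0, 0, none)
      decide (st.1 ≥ max 4 (PySem.Int.floordiv (trigrams.length : Int) 2))

-- ===== PRECONDITION & SPEC =====
def Spec_is_hallucination_loop (text : String) (out : Bool) : Prop := out = is_hallucination_loop_alt text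
instance (text : String) (out : Bool) : Decidable (Spec_is_hallucination_loop text out) := by unfold Spec_is_hallucination_loop; infer_instance

-- ===== CLAIM (what is proved, stated in full; the proofs are below) =====
def Claim_equal_is_hallucination_loop : Prop := ∀ (text : String), Dom_is_hallucination_loop text → Spec_is_hallucination_loop text (is_hallucination_loop text)

-- ===== LEMMAS AND PROOFS =====

def maxCount : List String → Nat
  | [] => 0
  | x :: xs => max (1 + xs.count x) (maxCount (xs.filter (fun y => y != x)))
termination_by l => l.length
decreasing_by simpa using Nat.lt_succ_of_le (List.length_filter_le _ _)

theorem maxCount_cons (a : String) (xs : List String) :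
    maxCount (a :: xs) = max (1 + xs.count a) (maxCount (xs.filter (fun y => y != a))) := by
  rw [maxCount]

theorem maxCount_nil : maxCount [] = 0 := by rw [maxCount]

theorem count_le_maxCount_aux (n : Nat) :
    ∀ l : List String, l.length ≤ n → ∀ x, l.count x ≤ maxCount l := by
  induction n with
  | zero =>
    intro l hl x
    have hnil : l = [] := List.length_eq_zero_iff.mp (Nat.le_zero.mp hl)
    subst hnil; simp [maxCount]
  | succ n ih =>
    intro l hl x
    match l with
    | [] => simp [maxCount]
    | a :: xs =>
      rw [maxCount_cons]
      by_cases hx : x = a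
      · subst hx
        rw [List.count_cons_self]
        omega
      · have h1 : (a :: xs).count x = (xs.filter (fun y => y != a)).count x := by
          rw [List.count_cons_of_ne (Ne.symm hx),
            List.count_filter (a := x) (p := fun y => y != a) (l := xs) (by simp [hx])]
        rw [h1]
        have := ih (xs.filter (fun y => y != a))
          (by have := List.length_filter_le (fun y => y != a) xs; simp at hl ⊢; omega) x
        omega

theorem count_le_maxCount (l : List String) (x : String) : l.count x ≤ maxCount l :=
  count_le_maxCount_aux l.length l le_rfl x

theorem maxCount_mem_aux (n : Nat) :
    ∀ l : List String, l.length ≤ n → l ≠ [] → ∃ x ∈ l, maxCount l = l.count x := by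
  induction n with
  | zero =>
    intro l hl h
    exact absurd (List.length_eq_zero_iff.mp (Nat.le_zero.mp hl)) h
  | succ n ih =>
    intro l hl h
    match l with
    | a :: xs =>
      rw [maxCount_cons]
      by_cases hc : maxCount (xs.filter (fun y => y != a)) ≤ 1 + xs.count a
      · refine ⟨a, by simp, ?_⟩
        rw [List.count_cons_self]
        omega
      · have hne : xs.filter (fun y => y != a) ≠ [] := by
          intro he; rw [he] at hc; simp [maxCount] at hc
        obtain ⟨x, hx, he⟩ := ih (xs.filter (fun y => y != a))
          (by have := List.length_filter_le (fun y => y != a) xs; simp at hl ⊢; omega) hne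
        have hxa : x ≠ a := by simpa using (List.of_mem_filter hx)
        refine ⟨x, by simp [List.mem_of_mem_filter hx], ?_⟩
        rw [List.count_cons_of_ne (Ne.symm hxa),
          ← List.count_filter (a := x) (p := fun y => y != a) (l := xs) (by simp [hxa]), ← he]
        omega

theorem maxCount_mem (l : List String) (h : l ≠ []) : ∃ x ∈ l, maxCount l = l.count x :=
  maxCount_mem_aux l.length l le_rfl h

theorem maxCount_perm {l l' : List String} (h : l.Perm l') : maxCount l = maxCount l' := by
  rcases eq_or_ne l [] with rfl | hne
  · rw [h.nil_eq]
  · have hne' : l' ≠ [] := by intro he; subst he; exact hne h.eq_nil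
    obtain ⟨x, hx, hxe⟩ := maxCount_mem l hne
    obtain ⟨y, hy, hye⟩ := maxCount_mem l' hne'
    have h1 : maxCount l ≤ maxCount l' := by
      rw [hxe, h.count_eq x]; exact count_le_maxCount _ _
    have h2 : maxCount l' ≤ maxCount l := by
      rw [hye, ← h.count_eq y]; exact count_le_maxCount _ _
    omega

theorem maxA_eq (l : List String) (h : l ≠ []) :
    PySem.List.max? ((PySem.Set.ofList l).map (fun t => (PySem.List.count l t : Int))) (fun c => c)
      = some ((maxCount l : Int)) := by
  obtain ⟨a, ha⟩ := List.exists_mem_of_ne_nil l h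
  have haS : a ∈ PySem.Set.ofList l := (PySem.Set.mem_ofList _ _).mpr ha
  have hcne : (PySem.Set.ofList l).map (fun t => (PySem.List.count l t : Int)) ≠ [] := by
    intro he
    rw [List.map_eq_nil_iff] at he
    rw [he] at haS; simp at haS
  cases hm : PySem.List.max? ((PySem.Set.ofList l).map (fun t => (PySem.List.count l t : Int))) (fun c => c) with
  | none => exact absurd ((PySem.List.max?_eq_none_iff _ _).mp hm) hcne
  | some m =>
    have hmem := PySem.List.max?_mem hm
    obtain ⟨t, htS, hte⟩ := List.mem_map.mp hmem
    have ht : t ∈ l := (PySem.Set.mem_ofList _ _).mp htS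
    obtain ⟨y, hy, hye⟩ := maxCount_mem l h
    have hyS : (PySem.List.count l y : Int) ∈ (PySem.Set.ofList l).map (fun t => (PySem.List.count l t : Int)) :=
      List.mem_map.mpr ⟨y, (PySem.Set.mem_ofList _ _).mpr hy, rfl⟩
    have h1 := PySem.List.max?_isMax hm _ hyS
    have h2 : PySem.List.count l t ≤ maxCount l := by
      rw [PySem.List.count_eq]; exact count_le_maxCount l t
    have h3 : PySem.List.count l y = maxCount l := by
      rw [PySem.List.count_eq]; omega
    simp only at h1
    congr 1
    rw [← hte, h3] at h1
    rw [← hte]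
    omega

theorem runGo (l : List String) : ∀ (p : String) (best run : Int),
    1 ≤ run → run ≤ best →
    List.Pairwise (· ≤ ·) (p :: l) →
    (l.foldl pvRunStep (best, run, some p)).1
      = max best (max (run + (l.count p : Int)) ((maxCount (l.filter (fun y => y != p)) : Nat) : Int)) := by
  induction l with
  | nil =>
    intro p best run h1 h2 _
    simp [maxCount_nil]
    omega
  | cons t ls ih =>
    intro p best run h1 h2 hs
    rw [List.foldl_cons]
    rcases List.pairwise_cons.mp hs with ⟨hp, hst⟩
    by_cases hpt : p = t
    · subst hpt
      have hstep : pvRunStep (best, run, some p) p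
          = (if run + 1 > best then run + 1 else best, run + 1, some p) := by
        simp [pvRunStep]
      rw [hstep]
      have hb' : run + 1 ≤ (if run + 1 > best then run + 1 else best) := by split_ifs <;> omega
      have hpw : List.Pairwise (· ≤ ·) (p :: ls) := by
        exact List.Pairwise.cons (fun y hy => hp y (List.mem_cons_of_mem _ hy))
          (List.pairwise_cons.mp hst).2
      rw [ih p _ (run + 1) (by omega) hb' hpw]
      rw [List.count_cons_self]
      have hfil : (p :: ls).filter (fun y => y != p) = ls.filter (fun y => y != p) := by
        simp
      rw [hfil]
      have hc : (0:Int) ≤ (ls.count p : Int) := Int.natCast_nonneg _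
      push_cast
      split_ifs <;> omega
    · have hstep : pvRunStep (best, run, some p) t
          = (if 1 > best then 1 else best, 1, some t) := by
        simp [pvRunStep, hpt]
      rw [hstep]
      have hb' : (1:Int) ≤ (if 1 > best then 1 else best) := by split_ifs <;> omega
      rw [ih t _ 1 le_rfl hb' hst]
      have hplt : p < t := lt_of_le_of_ne (hp t (List.mem_cons_self)) hpt
      have hnp : p ∉ t :: ls := by
        intro hmem
        rcases List.mem_cons.mp hmem with rfl | hmem'
        · exact hpt rfl
        · exact absurd rfl (ne_of_gt (lt_of_lt_of_le hplt ((List.pairwise_cons.mp hst).1 p hmem')))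
      have hcnt : (t :: ls).count p = 0 := List.count_eq_zero.mpr hnp
      have hfil : (t :: ls).filter (fun y => y != p) = t :: ls := by
        rw [List.filter_eq_self]
        intro y hy
        simp only [bne_iff_ne, ne_eq]
        intro he; subst he; exact hnp hy
      rw [hcnt, hfil, maxCount_cons]
      have hc : (0:Int) ≤ (ls.count t : Int) := Int.natCast_nonneg _
      push_cast
      split_ifs <;> omega

theorem maxB_eq (l : List String) (h : l ≠ []) :
    ((PySem.List.sorted l (fun t => t) false).foldl pvRunStep (0, 0, none)).1 = ((maxCount l : Nat) : Int) := by
  have hsne : PySem.List.sorted l (fun t => t) false ≠ [] := by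
    intro he
    exact h ((PySem.List.sorted_eq_nil_iff _ _ _).mp he)
  obtain ⟨t0, rest, hsrt⟩ := List.exists_cons_of_ne_nil hsne
  have hpw : List.Pairwise (· ≤ ·) (t0 :: rest) := by
    have := PySem.List.sorted_pairwise l (fun t => t) (κ := String)
    rw [hsrt] at this
    simpa using this
  have hperm : (t0 :: rest).Perm l := by
    have := PySem.List.sorted_perm l (fun t => t) false
    rwa [hsrt] at this
  rw [hsrt, List.foldl_cons]
  have hstep : pvRunStep (0, 0, none) t0 = (1, 1, some t0) := by
    simp [pvRunStep]
  rw [hstep, runGo rest t0 1 1 le_rfl le_rfl hpw]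
  rw [← maxCount_perm hperm, maxCount_cons]
  have hc : (0:Int) ≤ (rest.count t0 : Int) := Int.natCast_nonneg _
  push_cast
  omega

theorem drop_take_three (words : List String) (i : Nat) (h : i + 2 < words.length) :
    (words.drop i).take 3 = [words[i], words[1+i]'(by omega), words[2+i]'(by omega)] := by
  rw [List.drop_eq_getElem_cons (by omega), List.drop_eq_getElem_cons (i := i+1) (by omega),
    List.drop_eq_getElem_cons (i := i+2) (by omega)]
  simp only [List.take_succ_cons, List.take_zero]
  rw [getElem_congr_idx (show i+1 = 1+i by omega), getElem_congr_idx (show i+2 = 2+i by omega)]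

theorem trigrams_eq (words : List String) :
    (PySem.List.pyRange 0 (max 0 ((words.length : Int) - 2)) 1).map
        (fun i => PySem.Str.join " " (PySem.List.slice words (some i) (some (i + 3))))
      = (List.zip words (List.zip (PySem.List.slice words (some 1) none)
          (PySem.List.slice words (some 2) none))).map
        (fun p => PySem.Str.join " " [p.1, p.2.1, p.2.2]) := by
  have h1 : PySem.List.slice words (some 1) none = words.drop 1 := by
    have := PySem.List.slice_from_natCast (xs := words) (a := 1); simpa using this
  have h2 : PySem.List.slice words (some 2) none = words.drop 2 := by
    have := PySem.List.slice_from_natCast (xs := words) (a := 2); simpa using this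
  rw [h1, h2]
  apply List.ext_getElem
  · simp [PySem.List.length_pyRange_one]
    omega
  · intro i hi1 hi2
    have hlen : i + 2 < words.length := by
      simp [List.length_zip] at hi2
      omega
    simp only [List.getElem_map, PySem.List.getElem_pyRange_one, List.getElem_zip]
    have hb : (0 : Int) + (i : Int) = ((i : Nat) : Int) := by omega
    rw [hb]
    have hb3 : ((i : Nat) : Int) + 3 = (((i + 3 : Nat)) : Int) := by push_cast; ring
    rw [hb3, PySem.List.slice_natCast]
    have ht : i + 3 - i = 3 := by omega
    rw [ht, drop_take_three words i hlen]
    simp only [List.getElem_drop]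

theorem body_eq (words : List String) :
    (if words.length < 10 then false
     else
       let unique := PySem.Set.ofList words
       if PySem.Set.len unique ≤ 2 ∧ 10 ≤ words.length then true
       else
         let trigrams := (PySem.List.pyRange 0 (max 0 ((words.length : Int) - 2)) 1).map
           (fun i => PySem.Str.join " " (PySem.List.slice words (some i) (some (i + 3))))
         if trigrams = [] then false
         else
           match PySem.List.max? ((PySem.Set.ofList trigrams).map
               (fun t => (PySem.List.count trigrams t : Int))) (fun c => c) with
           | some top => decide (top ≥ max 4 (PySem.Int.floordiv (trigrams.length : Int) 2))
           | none => false)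
    = (if words.length < 10 then false
       else if PySem.Set.len (PySem.Set.ofList words) ≤ 2 then true
       else
         let trigrams := (List.zip words (List.zip (PySem.List.slice words (some 1) none)
             (PySem.List.slice words (some 2) none))).map
           (fun p => PySem.Str.join " " [p.1, p.2.1, p.2.2])
         if trigrams = [] then false
         else
           let st := (PySem.List.sorted trigrams (fun t => t) false).foldl pvRunStep (0, 0, none)
           decide (st.1 ≥ max 4 (PySem.Int.floordiv (trigrams.length : Int) 2))) := by
  by_cases hlen : words.length < 10
  · simp [hlen]
  · simp only [if_neg hlen]
    by_cases hu : PySem.Set.len (PySem.Set.ofList words) ≤ 2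
    · have h : PySem.Set.len (PySem.Set.ofList words) ≤ 2 ∧ 10 ≤ words.length := ⟨hu, by omega⟩
      simp only [if_pos h, if_pos hu]
    · have h : ¬ (PySem.Set.len (PySem.Set.ofList words) ≤ 2 ∧ 10 ≤ words.length) := fun hc => hu hc.1
      simp only [if_neg h, if_neg hu]
      rw [trigrams_eq words]
      set tg := (List.zip words (List.zip (PySem.List.slice words (some 1) none)
          (PySem.List.slice words (some 2) none))).map
        (fun p => PySem.Str.join " " [p.1, p.2.1, p.2.2]) with htg
      by_cases hnil : tg = []
      · simp [hnil]
      · simp only [if_neg hnil]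
        rw [maxA_eq tg hnil, maxB_eq tg hnil]

-- ===== VERDICT (by name: the statement is the Claim_ definition above) =====
theorem is_hallucination_loop_spec : Claim_equal_is_hallucination_loop := by
  intro text _
  unfold Spec_is_hallucination_loop is_hallucination_loop is_hallucination_loop_alt
  exact body_eq _
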